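-- pv_equiv track=rewrite | github.com/DevYevheniia/PythonHomeWork | src/homeWork/les_2025_11_04/cubes_of_numbers.py | generate_cube_numbers
-- ===== SOURCE A (Python) =====
-- def generate_cube_numbers(end: int):
--     """
--     Generates cubes of numbers, starting from 2,
--     until the cube exceeds the specified value.
--     Return:
--     int: The cube of the number each time the generator is called.
--     """
--     n = 2
--     while True:
--         cube = n ** 3
--         if cube > end:
--             return
--         yield cube
--         n += 1
-- ===== SOURCE B (Python) =====
-- def _icbrt_floor(end):
--     # largest m >= 1 with m**3 <= end (returns 1 when end < 8)
--     if end < 8: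
--         return 1
--     lo, hi = 2, end  # invariant: lo**3 <= end < hi**3
--     while hi - lo > 1:
--         mid = (lo + hi) // 2
--         if mid ** 3 <= end:
--             lo = mid
--         else:
--             hi = mid
--     return lo
--
--
-- def generate_cube_numbers(end):
--     m = _icbrt_floor(end)
--     for n in range(2, m + 1):
--         yield n ** 3
-- ===== Notes on version B (the rewrite author's own statement) =====
-- stated objective: alternative
-- what changed: B replaces A's scan-until loop (test each cube against end) with an exact integer cube root computed by bisection, then yields n**3 over the precomputed bounded range(2, m+1).
import Mathlib
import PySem

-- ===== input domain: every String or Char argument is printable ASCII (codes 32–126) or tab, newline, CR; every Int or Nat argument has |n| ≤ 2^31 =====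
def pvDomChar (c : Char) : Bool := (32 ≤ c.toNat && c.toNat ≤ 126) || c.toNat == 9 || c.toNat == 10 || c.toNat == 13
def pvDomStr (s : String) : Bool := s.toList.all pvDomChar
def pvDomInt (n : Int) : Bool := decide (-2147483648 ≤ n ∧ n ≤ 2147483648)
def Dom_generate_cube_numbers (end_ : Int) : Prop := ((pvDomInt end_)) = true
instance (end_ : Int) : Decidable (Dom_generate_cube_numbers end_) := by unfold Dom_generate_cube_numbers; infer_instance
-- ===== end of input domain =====

-- B computes the cube-root bound by bisection and maps cubes over a bounded range, instead of
-- A's increment-and-test scan; equivalence of the returned (yielded) list is proved below.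

-- ===== PORT A =====
-- while True: cube = n**3; if cube > end: return; yield cube; n += 1   (n starts at 2, only grows)
def cubeLoopA (end_ : Int) (n : Nat) : List Int :=
  if (n : Int) ^ 3 > end_ then []
  else (n : Int) ^ 3 :: cubeLoopA end_ (n + 1)
termination_by (end_ + 1 - n).toNat
decreasing_by
  have h3 : (n : Int) ≤ (n : Int) ^ 3 := by
    have : n ≤ n ^ 3 := Nat.le_self_pow (by norm_num) n
    exact_mod_cast this
  omega

def generate_cube_numbers (end_ : Int) : List Int := cubeLoopA end_ 2

-- ===== PORT B =====
-- while hi - lo > 1: mid = (lo+hi)//2; if mid**3 <= end: lo = mid else hi = mid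
def cubeBisect (end_ lo hi : Int) : Int :=
  if hlt : hi - lo > 1 then
    let mid := PySem.Int.floordiv (lo + hi) 2
    if mid ^ 3 ≤ end_ then cubeBisect end_ mid hi else cubeBisect end_ lo mid
  else lo
termination_by (hi - lo).toNat
decreasing_by
  · have h1 : lo + 1 ≤ PySem.Int.floordiv (lo + hi) 2 :=
      (PySem.Int.le_floordiv_iff_mul_le (by omega)).2 (by omega)
    omega
  · have h2 : PySem.Int.floordiv (lo + hi) 2 < hi :=
      (PySem.Int.floordiv_lt_iff_lt_mul (by omega)).2 (by omega)
    omega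

-- largest m ≥ 1 with m^3 ≤ end (1 when end < 8)
def icbrtFloor (end_ : Int) : Int :=
  if end_ < 8 then 1 else cubeBisect end_ 2 end_

def generate_cube_numbers_alt (end_ : Int) : List Int :=
  (PySem.List.pyRange 2 (icbrtFloor end_ + 1) 1).map (fun n => n ^ 3)

-- ===== PRECONDITION & SPEC =====
def Spec_generate_cube_numbers (end_ : Int) (out : List Int) : Prop := out = generate_cube_numbers_alt end_
instance (end_ : Int) (out : List Int) : Decidable (Spec_generate_cube_numbers end_ out) := by unfold Spec_generate_cube_numbers; infer_instance

-- ===== CLAIM (what is proved, stated in full; the proofs are below) =====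
def Claim_equal_generate_cube_numbers : Prop := ∀ (end_ : Int), Dom_generate_cube_numbers end_ → Spec_generate_cube_numbers end_ (generate_cube_numbers end_)

-- ===== LEMMAS AND PROOFS =====

theorem cubeBisect_correct (end_ : Int) : ∀ k (lo hi : Int), (hi - lo).toNat = k →
    lo < hi → lo ^ 3 ≤ end_ → end_ < hi ^ 3 →
    cubeBisect end_ lo hi ^ 3 ≤ end_ ∧ end_ < (cubeBisect end_ lo hi + 1) ^ 3 ∧ lo ≤ cubeBisect end_ lo hi := by
  intro k
  induction k using Nat.strong_induction_on with
  | _ k ih =>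
    intro lo hi hk hlt hlo hhi
    rw [cubeBisect]
    by_cases hgt : hi - lo > 1
    · simp only [hgt, dif_pos]
      set mid := PySem.Int.floordiv (lo + hi) 2 with hmid
      have h1 : lo + 1 ≤ mid := (PySem.Int.le_floordiv_iff_mul_le (by omega)).2 (by omega)
      have h2 : mid < hi := (PySem.Int.floordiv_lt_iff_lt_mul (by omega)).2 (by omega)
      by_cases hc : mid ^ 3 ≤ end_
      · simp only [hc, if_pos]
        have := ih (hi - mid).toNat (by omega) mid hi rfl (by omega) hc hhi
        exact ⟨this.1, this.2.1, by omega⟩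
      · simp only [hc, if_neg, not_false_iff]
        exact ih (mid - lo).toNat (by omega) lo mid rfl (by omega) hlo (by omega)
    · simp only [hgt, dif_neg, not_false_iff]
      have : hi = lo + 1 := by omega
      subst this
      exact ⟨hlo, hhi, le_refl _⟩

-- characterisation of the bound m = icbrtFloor end_
theorem icbrtFloor_spec (end_ : Int) (h : end_ ≤ 2147483648) :
    1 ≤ icbrtFloor end_ ∧ end_ < (icbrtFloor end_ + 1) ^ 3 ∧ (2 ≤ icbrtFloor end_ → icbrtFloor end_ ^ 3 ≤ end_) := by
  unfold icbrtFloor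
  by_cases h8 : end_ < 8
  · simp only [h8, if_pos]
    refine ⟨by omega, by norm_num; omega, by omega⟩
  · simp only [h8, if_neg, not_false_iff]
    have hend : 8 ≤ end_ := by omega
    have hhi : end_ < end_ ^ 3 := by
      have h2 : (1 : Int) < end_ ^ 2 := by nlinarith
      nlinarith [mul_lt_mul_of_pos_left h2 (show (0:Int) < end_ by omega)]
    have := cubeBisect_correct end_ (end_ - 2).toNat 2 end_ rfl (by omega) (by norm_num; omega) hhi
    exact ⟨by omega, this.2.1, fun _ => this.1⟩

-- cube monotonicity on nonnegatives
theorem cube_le_cube {a b : Int} (ha : 0 ≤ a) (hab : a ≤ b) : a ^ 3 ≤ b ^ 3 := by gcongr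

theorem cubeLoopA_eq (end_ : Int) (h : end_ ≤ 2147483648) :
    ∀ k (n : Nat), (icbrtFloor end_ + 1 - n).toNat = k → 2 ≤ n →
      cubeLoopA end_ n = (PySem.List.pyRange (n : Int) (icbrtFloor end_ + 1) 1).map (fun x => x ^ 3) := by
  obtain ⟨hm1, hm2, hm3⟩ := icbrtFloor_spec end_ h
  intro k
  induction k using Nat.strong_induction_on with
  | _ k ih =>
    intro n hk hn
    rw [cubeLoopA]
    by_cases hc : (n : Int) ^ 3 > end_
    · simp only [hc, if_pos]
      have hnm : icbrtFloor end_ < (n : Int) := by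
        by_contra hcon
        push Not at hcon
        by_cases h2m : 2 ≤ icbrtFloor end_
        · have := cube_le_cube (a := (n : Int)) (by positivity) hcon
          have := hm3 h2m
          omega
        · omega
      rw [PySem.List.pyRange_one_eq_nil (by omega)]
      simp
    · simp only [hc, if_neg, not_false_iff]
      have hnm : (n : Int) ≤ icbrtFloor end_ := by
        by_contra hcon
        push Not at hcon
        have : (icbrtFloor end_ + 1) ^ 3 ≤ (n : Int) ^ 3 := cube_le_cube (by omega) (by omega)
        omega
      have ihn := ih (icbrtFloor end_ + 1 - (n + 1)).toNat (by omega) (n + 1) rfl (by omega)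
      push_cast at ihn
      rw [PySem.List.pyRange_one_cons (by omega), List.map_cons, ihn]

-- ===== VERDICT (by name: the statement is the Claim_ definition above) =====
theorem generate_cube_numbers_spec : Claim_equal_generate_cube_numbers := by
  intro end_ hdom
  unfold Spec_generate_cube_numbers generate_cube_numbers generate_cube_numbers_alt
  have h : end_ ≤ 2147483648 := by
    unfold Dom_generate_cube_numbers pvDomInt at hdom
    simp at hdom; omega
  exact cubeLoopA_eq end_ h _ 2 rfl (by omega)
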